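-- pv_equiv track=rewrite | github.com/jalgard/T-Aligner | shell/orf_permutector.py | make_tl_dna
-- ===== SOURCE A (Python) =====
-- def make_tl_dna(crypto_seq):
--     """ Generate T-less reference profile for cryptogene """
--
--     t_acc = 0
--     tlp = []
--     tls = crypto_seq.replace('T', '')
--
--     while crypto_seq[0] == 'T':
--         crypto_seq = crypto_seq[1:]
--
--     for nuc in crypto_seq[1:]:
--         if nuc == 'T':
--             t_acc += 1
--
--         else:
--             tlp.append(t_acc)
--             t_acc = 0
--
--     tlp.append(t_acc)
--
--     return tlp, tls
-- ===== SOURCE B (Python) =====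
-- def make_tl_dna(crypto_seq):
--     """ Generate T-less reference profile for cryptogene """
--
--     tls = crypto_seq.replace('T', '')
--
--     # positions of the non-T characters; successive gaps give the T-run lengths
--     pos = [i for i, c in enumerate(crypto_seq) if c != 'T']
--
--     tlp = [q - p - 1 for p, q in zip(pos, pos[1:])]
--     tlp.append(len(crypto_seq) - pos[-1] - 1)
--
--     return tlp, tls
-- ===== Notes on version B (the rewrite author's own statement) =====
-- stated objective: alternative
-- what changed: A's per-character accumulator scan over the T-stripped string is replaced by a staged index-arithmetic computation: collect the positions of all non-T characters once, then the profile is the pairwise differences of consecutive positions minus 1 plus a final len - last - 1 entry; no stripping loop and no counter.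
-- outside the precondition, e.g. on make_tl_dna('T'): A raises IndexError, B raises IndexError
import Mathlib
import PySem

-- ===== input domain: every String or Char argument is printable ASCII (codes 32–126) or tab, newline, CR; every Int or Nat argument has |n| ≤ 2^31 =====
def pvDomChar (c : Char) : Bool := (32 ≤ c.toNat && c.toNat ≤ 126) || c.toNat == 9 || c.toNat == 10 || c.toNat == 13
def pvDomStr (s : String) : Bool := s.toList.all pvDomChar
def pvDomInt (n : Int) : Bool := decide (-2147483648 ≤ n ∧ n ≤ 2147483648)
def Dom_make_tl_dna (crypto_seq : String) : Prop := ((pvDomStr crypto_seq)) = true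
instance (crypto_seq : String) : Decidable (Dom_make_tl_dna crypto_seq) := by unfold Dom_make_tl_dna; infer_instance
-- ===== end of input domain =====

-- B replaces A's strip-then-accumulate scan by index arithmetic on the list of non-T positions (alternative decomposition); equal wherever A returns.

-- ===== PORT A =====
-- while crypto_seq[0] == 'T': crypto_seq = crypto_seq[1:]   (on empty/all-T Python raises IndexError; excluded by Pre_)
def pvStripT : List Char → List Char
  | [] => []
  | c :: cs => if c = 'T' then pvStripT cs else c :: cs

def make_tl_dna (crypto_seq : String) : List Int × String :=
  let tls := PySem.Str.replace crypto_seq "T" ""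
  let cs := pvStripT crypto_seq.toList
  let st := (cs.drop 1).foldl
    (fun (st : Int × List Int) nuc =>
      if nuc = 'T' then (st.1 + 1, st.2) else (0, st.2 ++ [st.1])) (0, [])
  (st.2 ++ [st.1], tls)

-- ===== PORT B =====
def make_tl_dna_alt (crypto_seq : String) : List Int × String :=
  let tls := PySem.Str.replace crypto_seq "T" ""
  -- pos = [i for i, c in enumerate(crypto_seq) if c != 'T']
  let pos := (PySem.List.enumerate crypto_seq.toList).filterMap
    (fun ic => if ic.2 ≠ 'T' then some ic.1 else none)
  -- tlp = [q - p - 1 for p, q in zip(pos, pos[1:])]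
  let tlp := List.zipWith (fun p q => q - p - 1) pos (pos.drop 1)
  -- tlp.append(len(crypto_seq) - pos[-1] - 1); pos[-1] raises IndexError when pos = [] (outside Pre_)
  (tlp ++ [(crypto_seq.toList.length : Int) - (pos.getLast?.getD 0) - 1], tls)

-- ===== PRECONDITION & SPEC =====
-- Python A raises IndexError when crypto_seq is empty or all 'T' (so does B, at pos[-1]); exactly those inputs are excluded.
def Pre_make_tl_dna (crypto_seq : String) : Prop := crypto_seq.toList.any (· ≠ 'T') = true
instance (crypto_seq : String) : Decidable (Pre_make_tl_dna crypto_seq) := by unfold Pre_make_tl_dna; infer_instance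
def pvWitness_make_tl_dna : String := "TACGT"

def Spec_make_tl_dna (crypto_seq : String) (out : List Int × String) : Prop := out = make_tl_dna_alt crypto_seq
instance (crypto_seq : String) (out : List Int × String) : Decidable (Spec_make_tl_dna crypto_seq out) := by unfold Spec_make_tl_dna; infer_instance

-- ===== CLAIM (what is proved, stated in full; the proofs are below) =====
def Claim_equal_make_tl_dna : Prop := ∀ (crypto_seq : String), Dom_make_tl_dna crypto_seq → Pre_make_tl_dna crypto_seq → Spec_make_tl_dna crypto_seq (make_tl_dna crypto_seq)

-- ===== LEMMAS AND PROOFS =====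

-- closed recursive form of A's fold (tlp empty, accumulator a)
def pvG : List Char → Int → List Int
  | [], a => [a]
  | c :: cs, a => if c = 'T' then pvG cs (a + 1) else a :: pvG cs 0

theorem pvFoldA (l : List Char) (a : Int) (p : List Int) :
    (let st := l.foldl
        (fun (st : Int × List Int) nuc =>
          if nuc = 'T' then (st.1 + 1, st.2) else (0, st.2 ++ [st.1])) (a, p)
     st.2 ++ [st.1]) = p ++ pvG l a := by
  induction l generalizing a p with
  | nil => simp [pvG]
  | cons c cs ih =>
    by_cases h : c = 'T' <;> simp [pvG, h, List.foldl_cons, ih]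

-- positions (as Python ints) of the non-T characters of l, counting from b
def pvPos : List Char → Int → List Int
  | [], _ => []
  | c :: cs, b => if c ≠ 'T' then b :: pvPos cs (b + 1) else pvPos cs (b + 1)

-- "gaps" form: pvDiffs e (p :: ps) = consecutive differences minus 1, closed by e - last - 1
def pvDiffs : Int → List Int → List Int
  | _, [] => []
  | e, [p] => [e - p - 1]
  | e, p :: q :: ps => (q - p - 1) :: pvDiffs e (q :: ps)

theorem pvG_eq_diffs (l : List Char) (a b : Int) :
    pvG l a = pvDiffs (b + l.length) ((b - a - 1) :: pvPos l b) := by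
  induction l generalizing a b with
  | nil => simp [pvG, pvPos, pvDiffs]; ring
  | cons c cs ih =>
    by_cases h : c = 'T'
    · subst h
      rw [pvG, if_pos rfl]
      have hp : pvPos ('T' :: cs) b = pvPos cs (b + 1) := by simp [pvPos]
      rw [hp, ih (a + 1) (b + 1)]
      rw [show b + 1 - (a + 1) - 1 = b - a - 1 by ring]
      congr 1
      simp only [List.length_cons]
      push_cast; ring
    · have ht := ih 0 (b + 1)
      rw [show b + 1 - 0 - 1 = b by ring] at ht
      have hp : pvPos (c :: cs) b = b :: pvPos cs (b + 1) := by simp [pvPos, h]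
      rw [pvG, if_neg h, hp, pvDiffs]
      rw [show b + (((c :: cs).length : Nat) : Int) = b + 1 + cs.length by
        simp only [List.length_cons]; push_cast; ring]
      rw [← ht]
      congr 1
      omega

-- B's comprehension + final append equals pvDiffs on a nonempty position list
theorem pvZip_eq_diffs (ps : List Int) (e : Int) (h : ps ≠ []) :
    List.zipWith (fun p q => q - p - 1) ps (ps.drop 1)
      ++ [e - (ps.getLast?.getD 0) - 1] = pvDiffs e ps := by
  induction ps with
  | nil => exact absurd rfl h
  | cons p ps ih =>
    cases ps with
    | nil => simp [pvDiffs]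
    | cons q qs =>
      have := ih (by simp)
      simp only [List.drop_succ_cons, List.drop_zero, List.zipWith_cons_cons, pvDiffs,
        List.cons_append]
      rw [← this]
      simp [List.getLast?_cons_cons]

-- B's filterMap over enumerate is pvPos
theorem pvFilterMap_eq_pos (l : List Char) (b : Int) :
    (PySem.List.enumerate l b).filterMap
      (fun ic => if ic.2 ≠ 'T' then some ic.1 else none) = pvPos l b := by
  induction l generalizing b with
  | nil => simp [pvPos, PySem.List.enumerate_nil]
  | cons c cs ih =>
    rw [PySem.List.enumerate_cons, List.filterMap_cons]
    by_cases h : c = 'T'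
    · have hif : (if (b, c).2 ≠ 'T' then some (b, c).1 else none) = none := by simp [h]
      rw [hif, ih, pvPos]
      simp [h]
    · have hif : (if (b, c).2 ≠ 'T' then some (b, c).1 else none) = some b := by simp [h]
      rw [hif, ih, pvPos]
      simp [h]

-- position shift: prefixing a 'T' shifts nothing but the base
theorem pvPos_stripT (l : List Char) :
    pvPos l 0 = (pvPos (pvStripT l) 0).map
      (fun p => p + ((l.length : Int) - (pvStripT l).length)) ∧
    (pvStripT l).length ≤ l.length := by
  induction l with
  | nil => simp [pvStripT, pvPos]
  | cons c cs ih =>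
    by_cases h : c = 'T'
    · refine ⟨?_, by simpa [pvStripT, h] using Nat.le_succ_of_le ih.2⟩
      have hshift : ∀ (m : List Char) (b : Int), pvPos m (b + 1) = (pvPos m b).map (· + 1) := by
        intro m
        induction m with
        | nil => simp [pvPos]
        | cons d ds ihm =>
          intro b
          by_cases hd : d = 'T' <;> simp [pvPos, hd, ihm]
      have hp : pvPos (c :: cs) 0 = pvPos cs 1 := by simp [pvPos, h]
      have hs : pvStripT (c :: cs) = pvStripT cs := by simp [pvStripT, h]
      rw [hp, hs, show (1 : Int) = 0 + 1 by ring, hshift cs 0, ih.1, List.map_map]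
      congr 1
      funext p
      simp only [Function.comp_apply, List.length_cons]
      push_cast
      ring
    · constructor
      · have hs : pvStripT (c :: cs) = c :: cs := by simp [pvStripT, h]
        rw [hs]
        simp
      · simp [pvStripT, h]

-- map-shift invariance of pvDiffs
theorem pvDiffs_shift (ps : List Int) (e t : Int) :
    pvDiffs (e + t) (ps.map (· + t)) = pvDiffs e ps := by
  induction ps with
  | nil => simp [pvDiffs]
  | cons p ps ih =>
    cases ps with
    | nil => simp [pvDiffs]
    | cons q qs =>
      simp only [List.map_cons] at ih ⊢
      rw [pvDiffs, pvDiffs]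
      rw [ih]
      congr 1
      ring

-- Pre_ gives a non-T head of the stripped list
theorem pvStripT_head (l : List Char) (h : l.any (· ≠ 'T') = true) :
    ∃ c cs, pvStripT l = c :: cs ∧ c ≠ 'T' := by
  induction l with
  | nil => simp at h
  | cons c cs ih =>
    by_cases hc : c = 'T'
    · subst hc
      have h' : cs.any (· ≠ 'T') = true := by simpa using h
      simpa [pvStripT] using ih h'
    · exact ⟨c, cs, by simp [pvStripT, hc], hc⟩

-- ===== VERDICT (by name: the statement is the Claim_ definition above) =====
theorem make_tl_dna_spec : Claim_equal_make_tl_dna := by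
  intro s _ hpre
  unfold Spec_make_tl_dna make_tl_dna make_tl_dna_alt
  simp only [pvFoldA, List.nil_append, pvFilterMap_eq_pos]
  refine Prod.ext ?_ rfl
  obtain ⟨c, cs, hstrip, hc⟩ := pvStripT_head s.toList hpre
  -- A's side: pvG over the tail of the stripped list
  rw [hstrip]
  simp only [List.drop_succ_cons, List.drop_zero]
  rw [pvG_eq_diffs cs 0 1]
  have hA : (1 : Int) - 0 - 1 = 0 := by ring
  rw [hA]
  have hpos : pvPos (c :: cs) 0 = 0 :: pvPos cs 1 := by simp [pvPos, hc]
  -- B's side: shift back to the stripped list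
  have hsh := pvPos_stripT s.toList
  rw [hsh.1, hstrip, hpos]
  have hne : (0 :: pvPos cs 1).map (· + ((s.toList.length : Int) - (c :: cs).length)) ≠ [] := by
    simp
  rw [pvZip_eq_diffs _ _ hne]
  set t : Int := (s.toList.length : Int) - ((c :: cs).length : Int) with hT
  rw [show ((s.toList.length : Nat) : Int) = (1 + (cs.length : Int)) + t by
    rw [hT]; simp only [List.length_cons]; push_cast; ring]
  exact (pvDiffs_shift (0 :: pvPos cs 1) (1 + (cs.length : Int)) t).symm
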